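-- pv_equiv track=rewrite | github.com/VUPPALA-HEMANTH-2005/wordle-solver | ALGO.py | orange
-- ===== SOURCE A (Python) =====
-- def orange(orangeLetters, possible_words):
--     search_space_modification = []
--     for letter in orangeLetters:
--         for word in possible_words:
--             if letter in word:
--                 search_space_modification.append(word)
--         possible_words = search_space_modification
--         search_space_modification = []
--     return possible_words
-- ===== SOURCE B (Python) =====
-- def orange(orangeLetters, possible_words):
--     return [word for word in possible_words
--             if all(letter in word for letter in orangeLetters)]
-- ===== Notes on version B (the rewrite author's own statement) =====
-- stated objective: simpler
-- what changed: One pass over possible_words with a compound all()-predicate replaces A's len(orangeLetters) successive list-rebuilding filter passes.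
import Mathlib
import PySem

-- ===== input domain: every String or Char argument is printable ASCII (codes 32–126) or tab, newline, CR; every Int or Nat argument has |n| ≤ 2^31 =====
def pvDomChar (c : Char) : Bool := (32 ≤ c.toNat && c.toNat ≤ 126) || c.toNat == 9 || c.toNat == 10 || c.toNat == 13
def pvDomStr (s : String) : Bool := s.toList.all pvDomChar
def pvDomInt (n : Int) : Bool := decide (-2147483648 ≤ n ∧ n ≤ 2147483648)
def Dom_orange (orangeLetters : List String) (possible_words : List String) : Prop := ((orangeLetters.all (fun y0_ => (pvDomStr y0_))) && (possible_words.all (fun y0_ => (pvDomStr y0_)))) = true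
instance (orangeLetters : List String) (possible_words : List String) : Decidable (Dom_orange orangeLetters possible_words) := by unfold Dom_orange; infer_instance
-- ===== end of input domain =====

-- B replaces A's successive per-letter filter passes with one pass testing all letters; same return value (objective: simpler).
-- ===== PORT A =====
def orange (orangeLetters : List String) (possible_words : List String) : List String :=
  orangeLetters.foldl
    (fun pw letter =>
      pw.foldl (fun acc word => if PySem.Str.isIn letter word then acc ++ [word] else acc) [])
    possible_words

-- ===== PORT B =====
def orange_alt (orangeLetters : List String) (possible_words : List String) : List String :=
  possible_words.filter (fun word => orangeLetters.all (fun letter => PySem.Str.isIn letter word))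

-- ===== PRECONDITION & SPEC =====
def Spec_orange (orangeLetters : List String) (possible_words : List String) (out : List String) : Prop := out = orange_alt orangeLetters possible_words
instance (orangeLetters : List String) (possible_words : List String) (out : List String) : Decidable (Spec_orange orangeLetters possible_words out) := by unfold Spec_orange; infer_instance

-- ===== CLAIM (what is proved, stated in full; the proofs are below) =====
def Claim_equal_orange : Prop := ∀ (orangeLetters : List String) (possible_words : List String), Dom_orange orangeLetters possible_words → Spec_orange orangeLetters possible_words (orange orangeLetters possible_words)

-- ===== LEMMAS AND PROOFS =====
lemma filter_foldl_filter (letters : List String) (pw : List String) :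
    letters.foldl (fun pw letter => pw.filter (PySem.Str.isIn letter)) pw
    = pw.filter (fun word => letters.all (fun letter => PySem.Str.isIn letter word)) := by
  induction letters generalizing pw with
  | nil => simp
  | cons l ls ih =>
    rw [List.foldl_cons, ih, List.filter_filter]
    simp only [List.all_cons]
    congr 1
    funext w
    exact Bool.and_comm _ _

-- ===== VERDICT (by name: the statement is the Claim_ definition above) =====
theorem orange_spec : Claim_equal_orange := by
  intro oL pw _
  unfold Spec_orange orange orange_alt
  simp only [PySem.List.foldl_append_if_eq_filter, List.nil_append]
  exact filter_foldl_filter oL pw
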